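-- pv_equiv track=rewrite | github.com/DenisLopushanskiy/Fundamental-and-Technical-Analysis-for-Capital-Markets-Indices-Hedging-Using-Options | days_to_exec.py | get_condition_type1
-- ===== SOURCE A (Python) =====
-- import copy
--
-- def get_condition_type1(FACondRaw, daysTillExecution):
--      '''Upgrades raw condition from FA indicator. Adds periods to the signal before the expiration date (type 1 condition).
--      :FACondRaw: initital condition from FA indicator
--      :daysTillExecution: daysLeft[0] usually
--      :output: list with upgraded periods for option calculation
--      '''
--      firstZeros = [ind for ind, x in enumerate(FACondRaw) if (FACondRaw[ind]==0 and FACondRaw[ind-1]==1)]#where to add list with units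
--      periodForSubsitution = [daysTillExecution[x] for x in firstZeros]#how many units to add to initial condition
--      condFAType1 = copy.copy(FACondRaw)
--      for ind, x in enumerate(firstZeros):
--           condFAType1[x:x+periodForSubsitution[ind]] = [1] * periodForSubsitution[ind]
--           condFAType1 = condFAType1[0:len(FACondRaw)]#in the case if length of substitution goes further than the sample size
--      return condFAType1
-- ===== SOURCE B (Python) =====
-- def get_condition_type1(FACondRaw, daysTillExecution):
--     '''Single left-to-right pass: keep the exclusive end of the forced-1 region
--     (union of the 1-runs started at each signal edge) and emit each element once.'''
--     n = len(FACondRaw)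
--     end = 0
--     out = []
--     for i in range(n):
--         if FACondRaw[i] == 0 and FACondRaw[i - 1] == 1:
--             end = max(end, i + daysTillExecution[i])
--         out.append(1 if i < end else FACondRaw[i])
--     return out
-- ===== Notes on version B (the rewrite author's own statement) =====
-- stated objective: faster
-- what changed: Replaces the per-edge slice-assignment loop (each step copies and truncates the whole list) by a single left-to-right pass that maintains the exclusive end of the union of forced-1 runs and emits each element once.
-- outside the precondition, e.g. on get_condition_type1([1, 0, 0], [0, -2, 0]): A returns [1, 0], B returns [1, 0, 0]
import Mathlib
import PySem

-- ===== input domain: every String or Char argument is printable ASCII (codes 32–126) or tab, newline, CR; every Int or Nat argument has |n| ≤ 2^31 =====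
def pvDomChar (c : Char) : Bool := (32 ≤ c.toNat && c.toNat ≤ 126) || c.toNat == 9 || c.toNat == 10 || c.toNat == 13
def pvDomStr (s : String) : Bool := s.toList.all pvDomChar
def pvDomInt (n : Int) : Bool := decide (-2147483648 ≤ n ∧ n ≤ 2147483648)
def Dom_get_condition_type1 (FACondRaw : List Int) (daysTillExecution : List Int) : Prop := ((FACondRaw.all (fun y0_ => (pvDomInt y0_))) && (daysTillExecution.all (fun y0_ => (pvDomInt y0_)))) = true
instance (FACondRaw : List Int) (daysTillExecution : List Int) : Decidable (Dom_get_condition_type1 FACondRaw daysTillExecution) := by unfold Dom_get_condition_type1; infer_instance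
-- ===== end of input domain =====

-- B replaces A's repeated slice-assignment (a full list copy per signal edge) by one
-- left-to-right pass maintaining the end of the forced-1 region (objective: faster).
-- A mutates no argument; the claim is about the return value.

-- ===== PORT A =====
-- Hand port (exact) of Python's list slice assignment `cond[x:x+p] = [1]*p` for a
-- nonnegative start index x: a negative stop x+p counts from the end (Python's rule),
-- both bounds are clamped to [0, len], and the slice is empty when stop < start.
def pvSliceAssignOnes (cond : List Int) (x : Nat) (p : Int) : List Int :=
  cond.take (min x cond.length)
    ++ List.replicate p.toNat 1
    ++ cond.drop (max (min x cond.length)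
        (min (max (if (x : Int) + p < 0 then (cond.length : Int) + ((x : Int) + p)
                   else (x : Int) + p) 0).toNat cond.length))

-- `(pyGet? daysTillExecution x).getD 0`: the default is reached only outside Pre_
-- (where the Python raises IndexError).
def get_condition_type1 (FACondRaw : List Int) (daysTillExecution : List Int) : List Int :=
  let n := FACondRaw.length
  let firstZeros := (List.range n).filter (fun (i : Nat) =>
    (PySem.List.pyGet? FACondRaw (i : Int) == some 0) &&
    (PySem.List.pyGet? FACondRaw ((i : Int) - 1) == some 1))
  let periodForSubsitution := firstZeros.map
    (fun (x : Nat) => (PySem.List.pyGet? daysTillExecution (x : Int)).getD 0)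
  (firstZeros.zip periodForSubsitution).foldl
    (fun cond xp => (pvSliceAssignOnes cond xp.1 xp.2).take n) FACondRaw

-- ===== PORT B =====
def get_condition_type1_alt (FACondRaw : List Int) (daysTillExecution : List Int) : List Int :=
  ((List.range FACondRaw.length).foldl
    (fun (st : Int × List Int) (i : Nat) =>
      let e :=
        if (PySem.List.pyGet? FACondRaw (i : Int) == some 0) &&
           (PySem.List.pyGet? FACondRaw ((i : Int) - 1) == some 1) then
          max st.1 ((i : Int) + (PySem.List.pyGet? daysTillExecution (i : Int)).getD 0)
        else st.1
      (e, st.2 ++ [if (i : Int) < e then 1 else (PySem.List.pyGet? FACondRaw (i : Int)).getD 0]))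
    ((0 : Int), ([] : List Int))).2

-- ===== PRECONDITION & SPEC =====
-- Pre_ excludes (a) inputs where A raises IndexError (a signal edge at position
-- i >= len(daysTillExecution)) and (b) inputs where some signal edge i has
-- i + daysTillExecution[i] < 0: there A's slice stop wraps to a negative index and
-- DELETES part of the list (e.g. returning a list shorter than the input), a value
-- that B — which always returns a list of the input's length — cannot match.
def Pre_get_condition_type1 (FACondRaw : List Int) (daysTillExecution : List Int) : Prop :=
  ∀ i, i < FACondRaw.length → FACondRaw.getD i 0 = 0 →
    (if i = 0 then FACondRaw.getD (FACondRaw.length - 1) 0 else FACondRaw.getD (i - 1) 0) = 1 →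
    (i < daysTillExecution.length ∧ 0 ≤ (i : Int) + daysTillExecution.getD i 0)
instance (FACondRaw : List Int) (daysTillExecution : List Int) : Decidable (Pre_get_condition_type1 FACondRaw daysTillExecution) := by unfold Pre_get_condition_type1; infer_instance
def pvWitness_get_condition_type1 : List Int × List Int := ([1, 0, 0], [5, 2, 0])

def Spec_get_condition_type1 (FACondRaw : List Int) (daysTillExecution : List Int) (out : List Int) : Prop := out = get_condition_type1_alt FACondRaw daysTillExecution
instance (FACondRaw : List Int) (daysTillExecution : List Int) (out : List Int) : Decidable (Spec_get_condition_type1 FACondRaw daysTillExecution out) := by unfold Spec_get_condition_type1; infer_instance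

-- ===== CLAIM (what is proved, stated in full; the proofs are below) =====
def Claim_equal_get_condition_type1 : Prop := ∀ (FACondRaw : List Int) (daysTillExecution : List Int), Dom_get_condition_type1 FACondRaw daysTillExecution → Pre_get_condition_type1 FACondRaw daysTillExecution → Spec_get_condition_type1 FACondRaw daysTillExecution (get_condition_type1 FACondRaw daysTillExecution)

-- ===== LEMMAS AND PROOFS =====

def pvStart (F : List Int) (i : Nat) : Bool :=
  (PySem.List.pyGet? F (i : Int) == some 0) && (PySem.List.pyGet? F ((i : Int) - 1) == some 1)

def pvPer (d : List Int) (x : Nat) : Int := (PySem.List.pyGet? d (x : Int)).getD 0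

theorem pv_map_getD (cond : List Int) :
    (List.range cond.length).map (fun i => cond.getD i 0) = cond := by
  apply List.ext_getElem (by simp)
  intro i h1 h2
  simp [List.getD_eq_getElem?_getD, List.getElem?_eq_getElem h2]

theorem pv_zip_self_map {α β : Type} (l : List α) (g : α → β) :
    l.zip (l.map g) = l.map (fun x => (x, g x)) := by
  induction l with
  | nil => rfl
  | cons a l ih => simp [ih]

theorem pv_sliceAssign_nonneg (cond : List Int) (n x : Nat) (p : Int)
    (hc : cond.length = n) (hx : x < n) (hp : 0 ≤ (x : Int) + p) :
    (pvSliceAssignOnes cond x p).take n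
      = (List.range n).map (fun i =>
          if x ≤ i ∧ (i : Int) < (x : Int) + p then (1 : Int)
          else cond.getD i 0) := by
  subst hc
  unfold pvSliceAssignOnes
  rw [if_neg (by omega)]
  rw [show min x cond.length = x by omega]
  by_cases hp0 : 0 ≤ p
  · -- p ≥ 0 : a real substitution [x, x+p)
    have ht : ((p.toNat : Int)) = p := Int.toNat_of_nonneg hp0
    rw [show (max ((x : Int) + p) 0).toNat = x + p.toNat by omega]
    apply List.ext_getElem
    · simp; omega
    · intro i h1 h2
      have hn : i < cond.length := by simpa using h2
      rw [List.getElem_take, List.getElem_map, List.getElem_range]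
      rcases Nat.lt_or_ge i x with hix | hix
      · rw [List.getElem_append_left (by simp; omega)]
        rw [List.getElem_append_left (by simp; omega)]
        rw [List.getElem_take]
        rw [if_neg (by omega)]
        simp [List.getD_eq_getElem?_getD, List.getElem?_eq_getElem hn]
      · rcases Nat.lt_or_ge i (x + p.toNat) with hip | hip
        · rw [List.getElem_append_left (by simp; omega)]
          rw [List.getElem_append_right (by simp; omega)]
          rw [List.getElem_replicate]
          rw [if_pos (by omega)]
        · rw [List.getElem_append_right (by simp; omega)]
          rw [List.getElem_drop]
          rw [if_neg (by omega)]
          rw [show cond.getD i 0 = cond[i] from List.getD_eq_getElem cond 0 hn]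
          congr 1
          simp only [List.length_append, List.length_take, List.length_replicate]
          omega
  · -- p < 0 (but x+p ≥ 0): empty slice, no-op
    have hq : p.toNat = 0 := by omega
    rw [hq]
    rw [show max x (min (max ((x : Int) + p) 0).toNat cond.length) = x by omega]
    simp only [List.replicate_zero, List.append_nil, List.take_append_drop]
    rw [List.take_length]
    nth_rewrite 1 [← pv_map_getD cond]
    apply List.map_congr_left
    intro i hi
    rw [if_neg (by omega)]

theorem pv_sliceAssign_noop (cond : List Int) (n x : Nat) (p : Int)
    (hc : cond.length = n) (hx : x < n) (h1 : (x : Int) + p < 0) (h2 : p ≤ -(n : Int)) :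
    (pvSliceAssignOnes cond x p).take n = cond := by
  subst hc
  unfold pvSliceAssignOnes
  rw [if_pos (by omega)]
  rw [show min x cond.length = x by omega]
  rw [show p.toNat = 0 by omega]
  rw [show max x
      (min (max ((cond.length : Int) + ((x : Int) + p)) 0).toNat cond.length) = x by omega]
  simp only [List.replicate_zero, List.append_nil, List.take_append_drop]
  rw [List.take_length]

theorem pv_foldA (n : Nat) :
    ∀ (ps : List (Nat × Int)) (cond : List Int), cond.length = n →
    (∀ xp ∈ ps, xp.1 < n ∧ (0 ≤ (xp.1 : Int) + xp.2 ∨ xp.2 ≤ -(n : Int))) →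
    ps.foldl (fun cond xp => (pvSliceAssignOnes cond xp.1 xp.2).take n) cond
      = (List.range n).map (fun i =>
          if ps.any (fun xp => decide (xp.1 ≤ i) && decide ((i : Int) < (xp.1 : Int) + xp.2))
          then 1 else cond.getD i 0) := by
  intro ps
  induction ps with
  | nil =>
    intro cond hc _
    subst hc
    simp only [List.foldl_nil, List.any_nil, Bool.false_eq_true, if_false]
    simpa [List.getD_eq_getElem?_getD] using (pv_map_getD cond).symm
  | cons xp ps ih =>
    intro cond hc hall
    obtain ⟨hx, hcase⟩ := hall xp (by simp)
    have hall' : ∀ q ∈ ps, q.1 < n ∧ (0 ≤ (q.1 : Int) + q.2 ∨ q.2 ≤ -(n : Int)) :=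
      fun q hq => hall q (by simp [hq])
    rw [List.foldl_cons]
    rcases hcase with h0 | h0
    · rw [pv_sliceAssign_nonneg cond n xp.1 xp.2 hc hx h0]
      rw [ih _ (by simp) hall']
      apply List.map_congr_left
      intro i hi
      simp only [List.mem_range] at hi
      have hget : ((List.range n).map (fun i =>
          if xp.1 ≤ i ∧ (i : Int) < (xp.1 : Int) + xp.2 then (1 : Int)
          else cond.getD i 0)).getD i 0
          = (if xp.1 ≤ i ∧ (i : Int) < (xp.1 : Int) + xp.2 then (1 : Int)
             else cond.getD i 0) := by
        rw [List.getD_eq_getElem?_getD, List.getElem?_map]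
        simp [hi]
      rw [hget, List.any_cons]
      by_cases hp1 : xp.1 ≤ i ∧ (i : Int) < (xp.1 : Int) + xp.2
      · simp [hp1]
      · have hb1 : (decide (xp.1 ≤ i) && decide ((i : Int) < (xp.1 : Int) + xp.2)) = false := by
          rw [Bool.and_eq_false_iff]
          by_cases hle : xp.1 ≤ i
          · exact Or.inr (by simpa using fun h => hp1 ⟨hle, h⟩)
          · exact Or.inl (by simpa using hle)
        rw [hb1, Bool.false_or, if_neg hp1]
    · have h1 : (xp.1 : Int) + xp.2 < 0 := by omega
      rw [pv_sliceAssign_noop cond n xp.1 xp.2 hc hx h1 h0]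
      rw [ih cond hc hall']
      apply List.map_congr_left
      intro i hi
      rw [List.any_cons]
      have hb1 : (decide (xp.1 ≤ i) && decide ((i : Int) < (xp.1 : Int) + xp.2)) = false := by
        rw [Bool.and_eq_false_iff]
        refine Or.inr (by simpa using by omega)
      rw [hb1, Bool.false_or]

def pvE (F d : List Int) (j : Nat) : Int :=
  (List.range j).foldl (fun (e : Int) (i : Nat) => if pvStart F i then max e ((i : Int) + pvPer d i) else e) 0

theorem pv_foldB (F d : List Int) (j : Nat) :
    (List.range j).foldl
      (fun (st : Int × List Int) (i : Nat) =>
        let e :=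
          if (PySem.List.pyGet? F (i : Int) == some 0) &&
             (PySem.List.pyGet? F ((i : Int) - 1) == some 1) then
            max st.1 ((i : Int) + (PySem.List.pyGet? d (i : Int)).getD 0)
          else st.1
        (e, st.2 ++ [if (i : Int) < e then 1 else (PySem.List.pyGet? F (i : Int)).getD 0]))
      ((0 : Int), ([] : List Int))
    = (pvE F d j, (List.range j).map (fun (i : Nat) =>
        if (i : Int) < pvE F d (i + 1) then 1 else (PySem.List.pyGet? F (i : Int)).getD 0)) := by
  induction j with
  | zero => simp [pvE]
  | succ j ih =>
    rw [List.range_succ, List.foldl_append, List.map_append, ih]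
    simp only [List.foldl_cons, List.foldl_nil, List.map_cons, List.map_nil]
    have hE : pvE F d (j + 1)
        = if pvStart F j then max (pvE F d j) ((j : Int) + pvPer d j) else pvE F d j := by
      unfold pvE
      rw [List.range_succ, List.foldl_append]
      simp
    rw [hE]
    rfl

theorem pv_lt_E (F d : List Int) (j : Nat) (v : Int) :
    v < pvE F d j ↔ (v < 0 ∨ ∃ x, x < j ∧ pvStart F x = true ∧ v < (x : Int) + pvPer d x) := by
  have main : ∀ (j : Nat) (c v : Int),
      v < (List.range j).foldl
        (fun (e : Int) (i : Nat) => if pvStart F i then max e ((i : Int) + pvPer d i) else e) c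
      ↔ (v < c ∨ ∃ x, x < j ∧ pvStart F x = true ∧ v < (x : Int) + pvPer d x) := by
    intro j
    induction j with
    | zero => simp
    | succ j ih =>
      intro c v
      rw [List.range_succ, List.foldl_append]
      simp only [List.foldl_cons, List.foldl_nil]
      by_cases h : pvStart F j
      · rw [if_pos h, lt_max_iff, ih]
        constructor
        · rintro (⟨hc | ⟨x, hx, hs, hv⟩⟩ | hv)
          · exact Or.inl hc
          · exact Or.inr ⟨x, by omega, hs, hv⟩
          · exact Or.inr ⟨j, by omega, h, hv⟩
        · rintro (hc | ⟨x, hx, hs, hv⟩)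
          · exact Or.inl (Or.inl hc)
          · rcases Nat.lt_succ_iff_lt_or_eq.mp hx with hxj | rfl
            · exact Or.inl (Or.inr ⟨x, hxj, hs, hv⟩)
            · exact Or.inr hv
      · rw [if_neg h, ih]
        constructor
        · rintro (hc | ⟨x, hx, hs, hv⟩)
          · exact Or.inl hc
          · exact Or.inr ⟨x, by omega, hs, hv⟩
        · rintro (hc | ⟨x, hx, hs, hv⟩)
          · exact Or.inl hc
          · rcases Nat.lt_succ_iff_lt_or_eq.mp hx with hxj | rfl
            · exact Or.inr ⟨x, hxj, hs, hv⟩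
            · exact absurd hs (by simp [h])
  simpa using main j 0 v

theorem pv_start_iff (F : List Int) (x : Nat) (hx : x < F.length) :
    pvStart F x = true ↔ (F.getD x 0 = 0 ∧
      (if x = 0 then F.getD (F.length - 1) 0 else F.getD (x - 1) 0) = 1) := by
  unfold pvStart
  rw [PySem.List.pyGet?_natCast]
  rw [List.getElem?_eq_getElem hx]
  have h1 : F.getD x 0 = F[x] := List.getD_eq_getElem F 0 hx
  by_cases hx0 : x = 0
  · subst hx0
    have hne : F ≠ [] := by intro h; subst h; simp at hx
    rw [if_pos rfl]
    have : ((0 : Nat) : Int) - 1 = -1 := by norm_num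
    rw [this, PySem.List.pyGet?_neg_one]
    rw [List.getLast?_eq_getElem?]
    have hlt : F.length - 1 < F.length := by omega
    rw [List.getElem?_eq_getElem hlt]
    simp [List.getD_eq_getElem?_getD, List.getElem?_eq_getElem hx,
      List.getElem?_eq_getElem hlt]
  · rw [if_neg hx0]
    have hcast : ((x : Nat) : Int) - 1 = (((x - 1 : Nat)) : Int) := by omega
    rw [hcast, PySem.List.pyGet?_natCast]
    have hlt : x - 1 < F.length := by omega
    rw [List.getElem?_eq_getElem hlt]
    simp [List.getD_eq_getElem?_getD, List.getElem?_eq_getElem hx,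
      List.getElem?_eq_getElem hlt]

-- ===== VERDICT (by name: the statement is the Claim_ definition above) =====
theorem pv_per_getD (d : List Int) (x : Nat) : pvPer d x = d.getD x 0 := by
  unfold pvPer
  rw [PySem.List.pyGet?_natCast, List.getD_eq_getElem?_getD]

theorem pv_getD_F (F : List Int) (i : Nat) :
    (PySem.List.pyGet? F (i : Int)).getD 0 = F.getD i 0 := by
  rw [PySem.List.pyGet?_natCast, List.getD_eq_getElem?_getD]

theorem get_condition_type1_spec : Claim_equal_get_condition_type1 := by
  intro F d _ hPre
  unfold Spec_get_condition_type1
  have hA : get_condition_type1 F d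
      = (((List.range F.length).filter (pvStart F)).map (fun x => (x, pvPer d x))).foldl
          (fun cond xp => (pvSliceAssignOnes cond xp.1 xp.2).take F.length) F := by
    show (((List.range F.length).filter (pvStart F)).zip
        (((List.range F.length).filter (pvStart F)).map (pvPer d))).foldl
        (fun cond xp => (pvSliceAssignOnes cond xp.1 xp.2).take F.length) F = _
    rw [pv_zip_self_map]
  have hB : get_condition_type1_alt F d
      = (List.range F.length).map (fun (i : Nat) =>
          if (i : Int) < pvE F d (i + 1) then (1 : Int)
          else (PySem.List.pyGet? F (i : Int)).getD 0) := by
    show ((List.range F.length).foldl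
      (fun (st : Int × List Int) (i : Nat) =>
        let e :=
          if (PySem.List.pyGet? F (i : Int) == some 0) &&
             (PySem.List.pyGet? F ((i : Int) - 1) == some 1) then
            max st.1 ((i : Int) + (PySem.List.pyGet? d (i : Int)).getD 0)
          else st.1
        (e, st.2 ++ [if (i : Int) < e then 1 else (PySem.List.pyGet? F (i : Int)).getD 0]))
      ((0 : Int), ([] : List Int))).2 = _
    rw [pv_foldB]
  rw [hA, hB]
  rw [pv_foldA F.length _ F rfl ?hall]
  case hall =>
    intro xp hxp
    obtain ⟨x, hxmem, rfl⟩ := List.mem_map.mp hxp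
    obtain ⟨hxr, hxs⟩ := List.mem_filter.mp hxmem
    have hxn : x < F.length := List.mem_range.mp hxr
    obtain ⟨hs1, hs2⟩ := (pv_start_iff F x hxn).mp hxs
    obtain ⟨-, hnn⟩ := hPre x hxn hs1 hs2
    refine ⟨hxn, Or.inl ?_⟩
    rw [pv_per_getD]
    exact hnn
  apply List.map_congr_left
  intro i hi
  have hin : i < F.length := List.mem_range.mp hi
  have hcond : ((((List.range F.length).filter (pvStart F)).map
        (fun x => (x, pvPer d x))).any
        (fun xp => decide (xp.1 ≤ i) && decide ((i : Int) < (xp.1 : Int) + xp.2)))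
      = decide ((i : Int) < pvE F d (i + 1)) := by
    rw [List.any_map]
    by_cases hB2 : (i : Int) < pvE F d (i + 1)
    · rcases (pv_lt_E F d (i + 1) (i : Int)).mp hB2 with h0 | ⟨x, hxj, hs, hv⟩
      · omega
      · simp only [hB2, decide_true]
        rw [List.any_eq_true]
        refine ⟨x, List.mem_filter.mpr ⟨List.mem_range.mpr (by omega), hs⟩, ?_⟩
        simp only [Function.comp_apply]
        simp
        exact ⟨by omega, hv⟩
    · simp only [hB2, decide_false]
      rw [List.any_eq_false]
      intro x hxmem
      obtain ⟨hxr, hxs⟩ := List.mem_filter.mp hxmem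
      simp only [Function.comp_apply]
      simp
      intro hxi
      by_contra hv
      push Not at hv
      exact hB2 ((pv_lt_E F d (i + 1) (i : Int)).mpr
        (Or.inr ⟨x, by omega, hxs, by omega⟩))
  rw [hcond, pv_getD_F]
  by_cases hB2 : (i : Int) < pvE F d (i + 1) <;> simp [hB2]
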